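-- pv_equiv track=rewrite | github.com/iammituraj/pequeno_riscv | assembler/pqr5asm.py | is_valid_ascii_argument
-- ===== SOURCE A (Python) =====
-- def is_valid_ascii_argument(argument):
--     # Ensure the argument is at least two characters long (to cover the missing quotes scenario)
--     if len(argument) < 2:
--         return False
--
--     # Check if the argument starts and ends with single quotes
--     if not (argument.startswith("'") and argument.endswith("'")):
--         return False
--
--     # Remove only the outermost pair of single quotes if present
--     if argument.startswith("'") and argument.endswith("'"):
--         argument = argument[1:-1]
--
--     # If the argument is empty after stripping quotes, it's valid
--     if not argument:
--         return True
--
--     # Validate the content of the argument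
--     i = 0
--     length = len(argument)
--     while i < length:
--         char = argument[i]
--
--         if char == '\\':
--             # Check if there's a next character to form a valid escape sequence
--             if i + 1 < length:
--                 next_char = argument[i + 1]
--                 # Valid escape sequences: \\ (backslash), \t (tab), \r (carriage return), \n (newline)
--                 if next_char in ['\\', "'", 't', 'r', 'n']:
--                     # Skip the next character as it's part of the escape sequence
--                     i += 2
--                 else:
--                     # Invalid escape sequence
--                     return False
--             else:
--                 # Trailing backslash is invalid
--                 return False
--         else:
--             # Any non-escape character is allowed
--             i += 1
--
--     # Verify size: should be 1 character or 2 characters if an escape sequence is present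
--     return (length == 1) or (length == 2 and argument.startswith('\\'))
-- ===== SOURCE B (Python) =====
-- def is_valid_ascii_argument(argument):
--     # Closed-form case analysis on the quoted content; no iteration.
--     if len(argument) < 2 or not (argument.startswith("'") and argument.endswith("'")):
--         return False
--     content = argument[1:-1]
--     if not content:
--         return True
--     if len(content) == 1:
--         return content != '\\'
--     if len(content) == 2:
--         return content[0] == '\\' and content[1] in ('\\', "'", 't', 'r', 'n')
--     return False
-- ===== Notes on version B (the rewrite author's own statement) =====
-- stated objective: simpler
-- what changed: Replaced A's escape-scanning while loop plus final length check with a direct closed-form case analysis on the length and characters of the stripped content.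
import Mathlib
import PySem

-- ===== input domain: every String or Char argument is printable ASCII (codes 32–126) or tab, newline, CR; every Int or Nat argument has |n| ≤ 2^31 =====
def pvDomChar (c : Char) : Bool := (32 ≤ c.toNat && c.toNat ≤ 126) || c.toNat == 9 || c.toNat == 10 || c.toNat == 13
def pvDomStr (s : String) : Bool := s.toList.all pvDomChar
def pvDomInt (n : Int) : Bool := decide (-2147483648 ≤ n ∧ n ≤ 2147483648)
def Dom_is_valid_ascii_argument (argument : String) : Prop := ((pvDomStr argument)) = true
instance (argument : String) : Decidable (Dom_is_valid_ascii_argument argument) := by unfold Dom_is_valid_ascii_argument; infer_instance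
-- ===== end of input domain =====

-- B replaces A's escape-scanning while loop + final length check by a closed-form case
-- analysis on the stripped content (simpler; same O(n) cost).

-- ===== PORT A =====
-- the while loop of A: i advances by 1 (plain char) or 2 (escape); the trailing
-- 'return (length == 1) or (length == 2 and argument.startswith('\\'))' executes when the loop exits.
def pvA_loop (cs : List Char) (i : Nat) : Bool :=
  if h : i < cs.length then
    let c := cs[i]
    if c = '\\' then
      if h2 : i + 1 < cs.length then
        let nc := cs[i + 1]
        if nc = '\\' ∨ nc = '\'' ∨ nc = 't' ∨ nc = 'r' ∨ nc = 'n' then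
          pvA_loop cs (i + 2)
        else
          false
      else
        false
    else
      pvA_loop cs (i + 1)
  else
    decide (cs.length = 1) || (decide (cs.length = 2) && PySem.Chars.startswith cs ['\\'])
termination_by cs.length - i

def is_valid_ascii_argument (argument : String) : Bool :=
  let cs := argument.toList
  if cs.length < 2 then false
  else if ¬ (PySem.Chars.startswith cs ['\''] && PySem.Chars.endswith cs ['\'']) then false
  else
    let cs := if PySem.Chars.startswith cs ['\''] && PySem.Chars.endswith cs ['\''] then
                PySem.List.slice cs (some 1) (some (-1))
              else cs
    if cs = [] then true
    else pvA_loop cs 0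

-- ===== PORT B =====
def is_valid_ascii_argument_alt (argument : String) : Bool :=
  let cs := argument.toList
  if cs.length < 2 ∨ ¬ (PySem.Chars.startswith cs ['\''] && PySem.Chars.endswith cs ['\'']) then
    false
  else
    match PySem.List.slice cs (some 1) (some (-1)) with
    | [] => true
    | [c] => c ≠ '\\'
    | [c1, c2] => c1 = '\\' && (c2 = '\\' || c2 = '\'' || c2 = 't' || c2 = 'r' || c2 = 'n')
    | _ => false

-- ===== PRECONDITION & SPEC =====
def Spec_is_valid_ascii_argument (argument : String) (out : Bool) : Prop := out = is_valid_ascii_argument_alt argument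
instance (argument : String) (out : Bool) : Decidable (Spec_is_valid_ascii_argument argument out) := by unfold Spec_is_valid_ascii_argument; infer_instance

-- ===== CLAIM (what is proved, stated in full; the proofs are below) =====
def Claim_equal_is_valid_ascii_argument : Prop := ∀ (argument : String), Dom_is_valid_ascii_argument argument → Spec_is_valid_ascii_argument argument (is_valid_ascii_argument argument)

-- ===== LEMMAS AND PROOFS =====

-- A's loop can never reach a 'true' exit when the content has length ≥ 3:
-- the final length check fails, so the loop either rejects an escape or falls through to false.
theorem pvA_loop_long (cs : List Char) (h3 : 3 ≤ cs.length) :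
    ∀ n i, cs.length - i ≤ n → pvA_loop cs i = false := by
  intro n
  induction n with
  | zero =>
      intro i hi
      rw [pvA_loop]
      have : ¬ i < cs.length := by omega
      simp only [this, dif_neg, not_false_eq_true]
      simp
      omega
  | succ n ih =>
      intro i hi
      rw [pvA_loop]
      by_cases h : i < cs.length
      · simp only [h, dif_pos]
        split_ifs with hc hn he
        · exact ih (i + 2) (by omega)
        · rfl
        · rfl
        · exact ih (i + 1) (by omega)
      · simp only [h, dif_neg, not_false_eq_true]
        simp
        omega

theorem pvA_loop_eq (cs : List Char) :
    pvA_loop cs 0 =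
      (match cs with
       | [] => false
       | [c] => decide (c ≠ '\\')
       | [c1, c2] => (decide (c1 = '\\')) && (decide (c2 = '\\') || decide (c2 = '\'') || decide (c2 = 't') || decide (c2 = 'r') || decide (c2 = 'n'))
       | _ => false) := by
  match cs with
  | [] => rw [pvA_loop]; simp
  | [c] =>
      by_cases hc : c = '\\'
      · rw [pvA_loop]; simp [hc]
      · have h1 : pvA_loop [c] 1 = true := by rw [pvA_loop]; simp
        rw [pvA_loop]; simp [hc, h1]
  | [c1, c2] =>
      by_cases h1 : c1 = '\\'
      · subst h1
        have h2t : pvA_loop ['\\', c2] 2 = true := by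
          rw [pvA_loop]; simp [PySem.Chars.startswith]
        by_cases h2 : c2 = '\\' ∨ c2 = '\'' ∨ c2 = 't' ∨ c2 = 'r' ∨ c2 = 'n'
        · rw [pvA_loop]; simp [h2, h2t]; tauto
        · rw [pvA_loop]
          push_neg at h2
          obtain ⟨ha, hb, hc, hd, he⟩ := h2
          simp [ha, hb, hc, hd, he]
      · have hs2 : pvA_loop [c1, c2] 2 = false := by
          rw [pvA_loop]; simp [PySem.Chars.startswith, List.isPrefixOf]; exact fun h => h1 h.symm
        have hs1 : pvA_loop [c1, c2] 1 = false := by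
          rw [pvA_loop]
          by_cases h2 : c2 = '\\'
          · simp [h2]
          · simp [h2, hs2]
        rw [pvA_loop]; simp [h1, hs1]
  | c1 :: c2 :: c3 :: rest =>
      exact pvA_loop_long _ (by simp) (c1 :: c2 :: c3 :: rest).length 0 (by omega)

-- ===== VERDICT (by name: the statement is the Claim_ definition above) =====
theorem is_valid_ascii_argument_spec : Claim_equal_is_valid_ascii_argument := by
  intro argument _
  unfold Spec_is_valid_ascii_argument is_valid_ascii_argument is_valid_ascii_argument_alt
  set cs := argument.toList with hcs
  by_cases hlen : cs.length < 2
  · simp [hlen]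
  · by_cases hq : (PySem.Chars.startswith cs ['\''] && PySem.Chars.endswith cs ['\'']) = true
    · simp only [hlen, hq, if_neg, if_pos, not_true_eq_false, ite_false, ite_true]
      simp only [Bool.not_eq_true'] at *
      set inner := PySem.List.slice cs (some 1) (some (-1)) with hin
      by_cases hempty : inner = []
      · simp [hlen, hq, hempty]
      · simp only [hlen, hq, hempty, if_neg, not_false_eq_true]
        rw [pvA_loop_eq]
        match inner with
        | [] => simp at hempty
        | [c] => simp [hlen, hq]
        | [c1, c2] => simp [hlen, hq]
        | c1 :: c2 :: c3 :: rest => simp [hlen, hq]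
    · simp [hlen, hq]
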